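-- pv_equiv track=rewrite | github.com/Eduardo-HortaS/Key-Residue-Annotate_Py | transfer_annotations.py | iterate_aligned_sequences
-- ===== SOURCE A (Python) =====
-- from typing import Any, Dict, Optional, Generator, Tuple, Callable
--
-- def iterate_aligned_sequences(
--     source_sequence: str,
--     target_sequence: str,
--     source_start: int,
--     target_start: int,
--     source_end: int,
--     target_end: int
-- ) -> Generator[Tuple[int, Optional[int], Optional[int], str, str], None, None]:
--     """
--     Yields index, current positions (source_pos, target_pos), and characters (source_char, target_char).
--     Positions are incremented only when the respective character is alphabetic.
--     For target sequence, positions are None when encountering deletion relative to consensus ('-') or insertion gap markers ('.').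
--     """
--     source_pos = None
--     target_pos = None
--     last_valid_target_pos = None
--     last_valid_source_pos = None
--
--     for index, (source_char, target_char) in enumerate(zip(source_sequence, target_sequence)):
--         # Increment counters for any letter
--         # Handle conservation or annotated sequence
--         if source_char.isalpha():
--             source_pos = source_start if last_valid_source_pos is None else last_valid_source_pos + 1
--             last_valid_source_pos = source_pos
--         else: # Gap character in source, set to None
--             source_pos = None
--
--         if target_char.isalpha():
--             target_pos = target_start if last_valid_target_pos is None else last_valid_target_pos + 1
--             last_valid_target_pos = target_pos
--         else: # Deletion ("-") or Insertion (".") gap - set None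
--             target_pos = None
--
--         yield index, source_pos, target_pos, source_char, target_char
--
--         if (source_pos is not None and source_pos == source_end) or (last_valid_target_pos is not None and last_valid_target_pos == target_end):
--             break
-- ===== SOURCE B (Python) =====
-- def _alpha_prefix(seq):
--     """Cumulative count of alphabetic characters: counts[i] = #alpha in seq[:i+1]."""
--     counts = []
--     c = 0
--     for ch in seq:
--         if ch.isalpha():
--             c += 1
--         counts.append(c)
--     return counts
--
--
-- def iterate_aligned_sequences(
--     source_sequence,
--     target_sequence,
--     source_start,
--     target_start,
--     source_end,
--     target_end,
-- ):
--     n = min(len(source_sequence), len(target_sequence))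
--     src = source_sequence[:n]
--     tgt = target_sequence[:n]
--     s_counts = _alpha_prefix(src)
--     t_counts = _alpha_prefix(tgt)
--
--     # Stage 2: number of rows emitted (the loop stops right after the row where it hits an end).
--     cut = n
--     for i in range(n):
--         hit_source = src[i].isalpha() and source_start - 1 + s_counts[i] == source_end
--         hit_target = t_counts[i] > 0 and target_start - 1 + t_counts[i] == target_end
--         if hit_source or hit_target:
--             cut = i + 1
--             break
--
--     # Stage 3: emit rows from the closed-form positions start - 1 + prefix_count.
--     for i in range(cut):
--         s_pos = source_start - 1 + s_counts[i] if src[i].isalpha() else None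
--         t_pos = target_start - 1 + t_counts[i] if tgt[i].isalpha() else None
--         yield (i, s_pos, t_pos, src[i], tgt[i])
-- ===== Notes on version B (the rewrite author's own statement) =====
-- stated objective: alternative
-- what changed: A's stateful generator carrying two last-valid-position variables and an in-loop break is replaced by a staged computation: precomputed alphabetic prefix-count arrays per sequence, closed-form positions start-1+count, a separate scan that finds the truncation point, and emission of the sliced rows.
import Mathlib
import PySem

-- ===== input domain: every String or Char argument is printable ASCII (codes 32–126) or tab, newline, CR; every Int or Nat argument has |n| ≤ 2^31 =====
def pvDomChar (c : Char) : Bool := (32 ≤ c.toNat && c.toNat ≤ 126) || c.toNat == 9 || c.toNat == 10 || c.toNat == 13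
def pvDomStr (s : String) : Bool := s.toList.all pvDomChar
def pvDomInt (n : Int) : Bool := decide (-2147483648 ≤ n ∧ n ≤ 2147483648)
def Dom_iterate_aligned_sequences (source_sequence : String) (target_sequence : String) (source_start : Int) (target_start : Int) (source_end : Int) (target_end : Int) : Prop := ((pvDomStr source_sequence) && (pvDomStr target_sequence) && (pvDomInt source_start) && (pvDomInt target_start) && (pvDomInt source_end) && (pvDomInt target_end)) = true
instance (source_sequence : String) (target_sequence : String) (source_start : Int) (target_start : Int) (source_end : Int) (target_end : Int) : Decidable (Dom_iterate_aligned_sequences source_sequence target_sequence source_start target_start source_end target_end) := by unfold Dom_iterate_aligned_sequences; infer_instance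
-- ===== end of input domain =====

-- B replaces A's stateful streaming loop (two last-valid-position variables with an in-loop break)
-- by staged computation: alphabetic prefix-count arrays, closed-form positions start-1+count,
-- a separate scan for the truncation point, then emission of the sliced rows (objective: alternative, same cost).

-- ===== PORT A =====
-- the for-loop of A: state = (last_valid_source_pos, last_valid_target_pos); yields collected into a list
def pvA_loop (source_start : Int) (target_start : Int) (source_end : Int) (target_end : Int) :
    Int → List (Char × Char) → Option Int → Option Int → List (Int × Option Int × Option Int × String × String)
  | _, [], _, _ => []
  | idx, (sc, tc) :: rest, lvs, lvt =>
    let source_pos : Option Int :=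
      if PySem.Chars.isalpha sc then some (match lvs with | none => source_start | some v => v + 1) else none
    let lvs' : Option Int := if PySem.Chars.isalpha sc then source_pos else lvs
    let target_pos : Option Int :=
      if PySem.Chars.isalpha tc then some (match lvt with | none => target_start | some v => v + 1) else none
    let lvt' : Option Int := if PySem.Chars.isalpha tc then target_pos else lvt
    (idx, source_pos, target_pos, String.ofList [sc], String.ofList [tc]) ::
      (if source_pos = some source_end ∨ lvt' = some target_end then []
       else pvA_loop source_start target_start source_end target_end (idx + 1) rest lvs' lvt')

def iterate_aligned_sequences (source_sequence : String) (target_sequence : String) (source_start : Int) (target_start : Int) (source_end : Int) (target_end : Int) : List (Int × Option Int × Option Int × String × String) :=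
  pvA_loop source_start target_start source_end target_end 0
    (source_sequence.toList.zip target_sequence.toList) none none

-- ===== PORT B =====
-- _alpha_prefix: cumulative count of alphabetic characters, carried as the running accumulator
def pvB_prefix : List Char → Int → List Int
  | [], _ => []
  | c :: r, acc =>
    let acc' := if PySem.Chars.isalpha c then acc + 1 else acc
    acc' :: pvB_prefix r acc'

-- stage 2 of Source B: number of rows to emit (first index hitting an end, plus one; else all)
def pvB_cut (source_start : Int) (target_start : Int) (source_end : Int) (target_end : Int) :
    List ((Char × Char) × Int × Int) → Nat
  | [] => 0
  | ((sc, _), scnt, tcnt) :: rest =>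
    if (PySem.Chars.isalpha sc ∧ source_start - 1 + scnt = source_end)
        ∨ (tcnt > 0 ∧ target_start - 1 + tcnt = target_end) then 1
    else pvB_cut source_start target_start source_end target_end rest + 1

-- stage 3 of Source B: emit rows from the closed-form positions start - 1 + prefix count
def pvB_rows (source_start : Int) (target_start : Int) :
    Int → List ((Char × Char) × Int × Int) → List (Int × Option Int × Option Int × String × String)
  | _, [] => []
  | i, ((a, b), scnt, tcnt) :: rest =>
    (i, if PySem.Chars.isalpha a then some (source_start - 1 + scnt) else none,
        if PySem.Chars.isalpha b then some (target_start - 1 + tcnt) else none,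
        String.ofList [a], String.ofList [b]) :: pvB_rows source_start target_start (i + 1) rest

def iterate_aligned_sequences_alt (source_sequence : String) (target_sequence : String) (source_start : Int) (target_start : Int) (source_end : Int) (target_end : Int) : List (Int × Option Int × Option Int × String × String) :=
  let s := source_sequence.toList
  let t := target_sequence.toList
  let n := min s.length t.length
  let src := s.take n
  let tgt := t.take n
  let z := (src.zip tgt).zip ((pvB_prefix src 0).zip (pvB_prefix tgt 0))
  pvB_rows source_start target_start 0
    (z.take (pvB_cut source_start target_start source_end target_end z))

-- ===== PRECONDITION & SPEC =====
def Spec_iterate_aligned_sequences (source_sequence : String) (target_sequence : String) (source_start : Int) (target_start : Int) (source_end : Int) (target_end : Int) (out : List (Int × Option Int × Option Int × String × String)) : Prop := out = iterate_aligned_sequences_alt source_sequence target_sequence source_start target_start source_end target_end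
instance (source_sequence : String) (target_sequence : String) (source_start : Int) (target_start : Int) (source_end : Int) (target_end : Int) (out : List (Int × Option Int × Option Int × String × String)) : Decidable (Spec_iterate_aligned_sequences source_sequence target_sequence source_start target_start source_end target_end out) := by unfold Spec_iterate_aligned_sequences; infer_instance

-- ===== CLAIM (what is proved, stated in full; the proofs are below) =====
def Claim_equal_iterate_aligned_sequences : Prop := ∀ (source_sequence : String) (target_sequence : String) (source_start : Int) (target_start : Int) (source_end : Int) (target_end : Int), Dom_iterate_aligned_sequences source_sequence target_sequence source_start target_start source_end target_end → Spec_iterate_aligned_sequences source_sequence target_sequence source_start target_start source_end target_end (iterate_aligned_sequences source_sequence target_sequence source_start target_start source_end target_end)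

-- ===== LEMMAS AND PROOFS =====

-- A's last-valid option as a function of B's running count
def pvOpt (start c : Int) : Option Int := if c = 0 then none else some (start - 1 + c)

lemma pvOpt_match (ss cs : Int) :
    (match pvOpt ss cs with | none => ss | some v => v + 1) = ss - 1 + (cs + 1) := by
  by_cases h : cs = 0
  · subst h
    show ss = ss - 1 + (0 + 1)
    omega
  · rw [show pvOpt ss cs = some (ss - 1 + cs) from if_neg h]
    show ss - 1 + cs + 1 = ss - 1 + (cs + 1)
    omega

lemma pvOpt_succ (ss cs : Int) (h : 0 ≤ cs) : pvOpt ss (cs + 1) = some (ss - 1 + (cs + 1)) := by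
  simp only [pvOpt, if_neg (show ¬ cs + 1 = 0 by omega)]

lemma pvOpt_some_iff (ts ct te : Int) (h : 0 ≤ ct) :
    (pvOpt ts ct = some te) ↔ (ct > 0 ∧ ts - 1 + ct = te) := by
  by_cases h0 : ct = 0
  · subst h0; simp [pvOpt]
  · simp only [pvOpt, if_neg h0, Option.some.injEq]
    constructor
    · intro he; exact ⟨by omega, he⟩
    · intro he; exact he.2

lemma pv_loop_eq (ss ts se te : Int) :
    ∀ (s t : List Char) (idx cs ct : Int), 0 ≤ cs → 0 ≤ ct →
      pvA_loop ss ts se te idx (s.zip t) (pvOpt ss cs) (pvOpt ts ct) =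
      pvB_rows ss ts idx
        (((s.zip t).zip ((pvB_prefix s cs).zip (pvB_prefix t ct))).take
          (pvB_cut ss ts se te ((s.zip t).zip ((pvB_prefix s cs).zip (pvB_prefix t ct))))) := by
  intro s
  induction s with
  | nil => intro t idx cs ct _ _; simp [pvA_loop, pvB_rows, pvB_cut, pvB_prefix]
  | cons sc s ih =>
    intro t idx cs ct hcs hct
    cases t with
    | nil => simp [pvA_loop, pvB_rows, pvB_cut, pvB_prefix]
    | cons tc t =>
      have hctpos : (0:Int) < ct + 1 := by omega
      by_cases hsc : PySem.Chars.isalpha sc = true <;> by_cases htc : PySem.Chars.isalpha tc = true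
      · have ihx := ih t (idx+1) (cs+1) (ct+1) (by omega) (by omega)
        rw [pvOpt_succ ss cs hcs, pvOpt_succ ts ct hct] at ihx
        simp only [List.zip_cons_cons, pvA_loop, pvB_prefix, hsc, htc, if_true, pvOpt_match,
          pvB_cut, Option.some.injEq, hctpos, true_and]
        split_ifs with hbr
        · simp [pvB_rows, List.take, hsc, htc]
        · rw [List.take_succ_cons]
          simp only [pvB_rows, hsc, htc, if_true]
          exact congrArg _ ihx
      · have ihx := ih t (idx+1) (cs+1) ct (by omega) hct
        rw [pvOpt_succ ss cs hcs] at ihx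
        simp only [List.zip_cons_cons, pvA_loop, pvB_prefix, hsc, htc, if_true,
          Bool.false_eq_true, if_false, pvOpt_match, pvB_cut, Option.some.injEq,
          pvOpt_some_iff ts ct te hct, true_and]
        split_ifs with hbr
        · simp [pvB_rows, List.take, hsc, htc]
        · rw [List.take_succ_cons]
          simp only [pvB_rows, hsc, htc, if_true, Bool.false_eq_true, if_false]
          exact congrArg _ ihx
      · have ihx := ih t (idx+1) cs (ct+1) hcs (by omega)
        rw [pvOpt_succ ts ct hct] at ihx
        simp only [List.zip_cons_cons, pvA_loop, pvB_prefix, hsc, htc, if_true,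
          Bool.false_eq_true, if_false, pvOpt_match, pvB_cut, Option.some.injEq,
          hctpos, true_and, and_true, false_and, false_or, reduceCtorEq]
        split_ifs with hbr
        · simp [pvB_rows, List.take, hsc, htc]
        · rw [List.take_succ_cons]
          simp only [pvB_rows, hsc, htc, Bool.false_eq_true, if_false, if_true]
          exact congrArg _ ihx
      · have ihx := ih t (idx+1) cs ct hcs hct
        simp only [List.zip_cons_cons, pvA_loop, pvB_prefix, hsc, htc,
          Bool.false_eq_true, if_false, pvB_cut, pvOpt_some_iff ts ct te hct,
          false_and, false_or, reduceCtorEq]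
        split_ifs with hbr
        · simp [pvB_rows, List.take, hsc, htc]
        · rw [List.take_succ_cons]
          simp only [pvB_rows, hsc, htc, Bool.false_eq_true, if_false]
          exact congrArg _ ihx

lemma pvOpt_zero (start : Int) : pvOpt start 0 = none := by simp [pvOpt]

-- ===== VERDICT (by name: the statement is the Claim_ definition above) =====
theorem iterate_aligned_sequences_spec : Claim_equal_iterate_aligned_sequences := by
  intro S T a b c d _
  unfold Spec_iterate_aligned_sequences iterate_aligned_sequences iterate_aligned_sequences_alt
  have hz : ((S.toList.take (min S.toList.length T.toList.length)).zip
      (T.toList.take (min S.toList.length T.toList.length))) = S.toList.zip T.toList := by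
    rw [List.zip, ← List.take_zipWith, ← List.zip]
    exact List.take_of_length_le (by simp)
  have key := pv_loop_eq a b c d
    (S.toList.take (min S.toList.length T.toList.length))
    (T.toList.take (min S.toList.length T.toList.length)) 0 0 0 le_rfl le_rfl
  rw [pvOpt_zero, pvOpt_zero] at key
  simp only [] at key ⊢
  rw [hz] at key ⊢
  exact key
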